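-- pv_equiv track=rewrite | github.com/benquick123/code-profiling | code/batch-2/vse-naloge-brez-testov/DN9-M-038.py | opisi_stanje_2
-- ===== SOURCE A (Python) =====
-- def opisi_stanje_2(x, y, smer):
--     spacex = ""
--     if smer == "N":
--         smer = "^"
--
--     if smer == "S":
--         smer = "v"
--
--     if smer == "E":
--         smer = ">"
--
--     if smer == "W":
--         smer = "<"
--
--     for i in range(4, len(str(x)), -1):
--         spacex = spacex + " "
--
--
--     return smer+spacex + "("+ str(x) +  ":" + str(y) + ")"
-- ===== SOURCE B (Python) =====
-- ARROWS = [("N", "^"), ("S", "v"), ("E", ">"), ("W", "<")]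
--
--
-- def opisi_stanje_2(x, y, smer):
--     # first-match recursive scan of a direction table (pass-through if absent)
--     def arrow(s, table):
--         if not table:
--             return s
--         d, a = table[0]
--         return a if s == d else arrow(s, table[1:])
--
--     # recursively left-pad the "(<x>" segment to width 5
--     def pad(seg):
--         return seg if len(seg) >= 5 else pad(" " + seg)
--
--     return arrow(smer, ARROWS) + pad("(" + str(x)) + ":" + str(y) + ")"
-- ===== Notes on version B (the rewrite author's own statement) =====
-- stated objective: alternative
-- what changed: Replaced the four hardcoded if-reassignments with a table-driven recursive first-match lookup over a (direction, arrow) list, and the countdown-range space-appending loop with a recursive left-padding of the combined "(<x>" segment to a fixed width of 5.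
import Mathlib
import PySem

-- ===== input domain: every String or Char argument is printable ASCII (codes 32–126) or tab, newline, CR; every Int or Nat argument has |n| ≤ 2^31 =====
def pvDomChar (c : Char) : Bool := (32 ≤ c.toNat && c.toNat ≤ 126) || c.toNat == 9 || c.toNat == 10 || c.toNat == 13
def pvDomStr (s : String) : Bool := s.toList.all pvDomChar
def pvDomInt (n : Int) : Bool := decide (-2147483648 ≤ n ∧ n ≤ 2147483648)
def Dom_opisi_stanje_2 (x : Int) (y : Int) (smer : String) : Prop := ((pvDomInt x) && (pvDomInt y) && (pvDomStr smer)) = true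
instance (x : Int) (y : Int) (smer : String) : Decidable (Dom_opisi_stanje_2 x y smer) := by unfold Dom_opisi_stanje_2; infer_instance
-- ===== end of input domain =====

-- B replaces A's four hardcoded if-reassignments by a table-driven recursive first-match
-- lookup, and A's countdown-range space loop by recursively left-padding the "(<x>" segment
-- to width 5 (objective: alternative decomposition).
-- Strings are built as List Char (PySem.Chars convention) and wrapped with String.ofList.

-- ===== PORT A =====
def opisi_stanje_2 (x : Int) (y : Int) (smer : String) : String :=
  -- spacex = ""; four sequential ifs reassigning smer
  let smer := if smer = "N" then "^" else smer
  let smer := if smer = "S" then "v" else smer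
  let smer := if smer = "E" then ">" else smer
  let smer := if smer = "W" then "<" else smer
  -- for i in range(4, len(str(x)), -1): spacex = spacex + " "
  let spacex : List Char :=
    (PySem.List.pyRange 4 ((PySem.Int.toChars x).length : Int) (-1)).foldl
      (fun acc _ => acc ++ [' ']) []
  String.ofList (smer.toList ++ spacex ++ ['('] ++ PySem.Int.toChars x ++ [':']
      ++ PySem.Int.toChars y ++ [')'])

-- ===== PORT B =====
-- def arrow(s, table): first-match recursive scan, pass-through if absent
def bArrow (s : String) : List (String × String) → String
  | [] => s
  | (d, a) :: rest => if s = d then a else bArrow s rest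

-- def pad(seg): return seg if len(seg) >= 5 else pad(" " + seg)
def bPad (seg : List Char) : List Char :=
  if 5 ≤ seg.length then seg else bPad (' ' :: seg)
termination_by 5 - seg.length

def opisi_stanje_2_alt (x : Int) (y : Int) (smer : String) : String :=
  String.ofList
    ((bArrow smer [("N", "^"), ("S", "v"), ("E", ">"), ("W", "<")]).toList
      ++ bPad ('(' :: PySem.Int.toChars x)
      ++ [':'] ++ PySem.Int.toChars y ++ [')'])

-- ===== PRECONDITION & SPEC =====
def Spec_opisi_stanje_2 (x : Int) (y : Int) (smer : String) (out : String) : Prop := out = opisi_stanje_2_alt x y smer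
instance (x : Int) (y : Int) (smer : String) (out : String) : Decidable (Spec_opisi_stanje_2 x y smer out) := by unfold Spec_opisi_stanje_2; infer_instance

-- ===== CLAIM (what is proved, stated in full; the proofs are below) =====
def Claim_equal_opisi_stanje_2 : Prop := ∀ (x : Int) (y : Int) (smer : String), Dom_opisi_stanje_2 x y smer → Spec_opisi_stanje_2 x y smer (opisi_stanje_2 x y smer)

-- ===== LEMMAS AND PROOFS =====

-- the space-appending fold is a replicate of the list's length
theorem foldl_append_space (l : List Int) (acc : List Char) :
    l.foldl (fun a (_ : Int) => a ++ [' ']) acc = acc ++ List.replicate l.length ' ' := by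
  induction l generalizing acc with
  | nil => simp
  | cons h t ih =>
      rw [List.foldl_cons, ih, List.append_assoc]
      simp [List.replicate_succ]

-- B's recursive pad prepends exactly the missing spaces
theorem bPad_eq (seg : List Char) :
    bPad seg = List.replicate (5 - seg.length) ' ' ++ seg := by
  fun_induction bPad seg with
  | case1 seg h => simp [Nat.sub_eq_zero_of_le h]
  | case2 seg h ih =>
      rw [ih]
      have : 5 - seg.length = (5 - (' ' :: seg).length) + 1 := by simp at h ⊢; omega
      rw [this, List.replicate_succ']
      simp

-- A's spacex list equals the padding B prepends to '(' :: str(x)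
theorem spacex_eq (cx : List Char) :
    (PySem.List.pyRange 4 (cx.length : Int) (-1)).foldl (fun a (_ : Int) => a ++ [' ']) []
      = List.replicate (5 - ('(' :: cx).length) ' ' := by
  rw [foldl_append_space]
  simp [PySem.List.pyRange_neg_one]

-- A's if-chain equals B's table-driven first-match lookup
theorem dir_eq (smer : String) :
    (let s1 := if smer = "N" then "^" else smer
     let s2 := if s1 = "S" then "v" else s1
     let s3 := if s2 = "E" then ">" else s2
     if s3 = "W" then "<" else s3)
      = bArrow smer [("N", "^"), ("S", "v"), ("E", ">"), ("W", "<")] := by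
  by_cases h1 : smer = "N"
  · subst h1; decide
  by_cases h2 : smer = "S"
  · subst h2; decide
  by_cases h3 : smer = "E"
  · subst h3; decide
  by_cases h4 : smer = "W"
  · subst h4; decide
  simp [bArrow, h1, h2, h3, h4]

-- ===== VERDICT (by name: the statement is the Claim_ definition above) =====
theorem opisi_stanje_2_spec : Claim_equal_opisi_stanje_2 := by
  intro x y smer _
  unfold Spec_opisi_stanje_2
  simp only [opisi_stanje_2, opisi_stanje_2_alt, dir_eq, spacex_eq, bPad_eq]
  simp
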